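-- pv_equiv track=rewrite | github.com/SpionSkummis/Advent-of-Code-2018 | Erik/Day08.py | nodeLen
-- ===== SOURCE A (Python) =====
-- def nodeLen(inList, pos):
--     thisNodeLen = 0
--     chSumSum = 0
--     #Har den metadata, om ja, ta emot och skicka tillbaka
--     #Om den har barn ska den anropa funktionen för barnet
--     startPos = pos
--     childNr = inList[startPos]
--     metaLen = inList[startPos+1]
--     if(childNr == 0):
--         thisNodeLen = 2+metaLen
--         chSumSum = sum(inList[startPos+2:startPos+2+metaLen])
--         return (thisNodeLen,chSumSum)
--     else:
--         currPos = startPos + 2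
--         for i in range(0,childNr):
--             tempCont = nodeLen(inList,currPos)
--             currPos += tempCont[0]
--             chSumSum += tempCont[1]
--         chSumSum += sum(inList[currPos:currPos+metaLen])
--         thisNodeLen = currPos + metaLen - startPos
--     return (thisNodeLen,chSumSum)
-- ===== SOURCE B (Python) =====
-- def nodeLen(inList, pos):
--     # Iterative explicit-stack parser: one cursor, frames of (children left, metadata length).
--     total = 0
--     stack = [(inList[pos], inList[pos + 1])]
--     cur = pos + 2
--     while stack:
--         ch, me = stack[-1]
--         if ch > 0:
--             stack[-1] = (ch - 1, me)
--             stack.append((inList[cur], inList[cur + 1]))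
--             cur += 2
--         else:
--             total += sum(inList[cur:cur + me])
--             cur += me
--             stack.pop()
--     return (cur - pos, total)
-- ===== Notes on version B (the rewrite author's own statement) =====
-- stated objective: alternative
-- what changed: Replaces A's per-node recursion (recursive call per child inside a counting loop) with a single iterative loop over an explicit stack of (children-left, metadata-length) frames and one cursor; the length is recovered as final cursor minus start.
import Mathlib
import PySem

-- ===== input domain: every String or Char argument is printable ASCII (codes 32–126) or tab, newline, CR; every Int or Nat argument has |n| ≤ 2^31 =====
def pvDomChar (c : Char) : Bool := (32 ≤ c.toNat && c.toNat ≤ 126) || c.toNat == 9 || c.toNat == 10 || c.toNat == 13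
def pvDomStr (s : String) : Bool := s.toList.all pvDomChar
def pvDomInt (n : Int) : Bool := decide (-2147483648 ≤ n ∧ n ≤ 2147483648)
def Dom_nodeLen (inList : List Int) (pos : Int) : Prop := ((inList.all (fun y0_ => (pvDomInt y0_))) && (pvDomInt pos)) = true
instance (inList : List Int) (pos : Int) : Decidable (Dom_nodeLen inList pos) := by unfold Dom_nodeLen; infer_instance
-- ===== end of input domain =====

-- B replaces A's per-node recursion by a single iterative loop over an explicit stack of
-- (children-left, metadata-length) frames with one cursor (alternative decomposition, same
-- asymptotic cost); return values are proved equal on Pre_.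

-- ===== PORT A =====
-- A's inner 'for i in range(0, childNr)' loop: counts down the iteration count, advancing
-- currPos by each child's length and accumulating the children's metadata sums.
def nodeLenChildren (rec : Int → Option (Int × Int)) : Nat → Int → Int → Option (Int × Int)
  | 0, currPos, acc => some (currPos, acc)
  | n + 1, currPos, acc =>
    match rec currPos with
    | some t => nodeLenChildren rec n (currPos + t.1) (acc + t.2)
    | none => none

-- A's recursion, made total with a fuel parameter (never exhausted on inputs in Pre_);
-- 'none' is exactly where the Python raises.
def nodeLenGo (inList : List Int) : Nat → Int → Option (Int × Int)
  | 0, _ => none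
  | f + 1, pos =>
    match PySem.List.pyGet? inList pos, PySem.List.pyGet? inList (pos + 1) with
    | some childNr, some metaLen =>
      if childNr = 0 then
        some (2 + metaLen, (PySem.List.slice inList (some (pos + 2)) (some (pos + 2 + metaLen))).sum)
      else
        -- 'for i in range(0, childNr)' iterates childNr.toNat times (the range list itself is unused)
        match nodeLenChildren (fun c => nodeLenGo inList f c) childNr.toNat (pos + 2) 0 with
        | some r =>
          some (r.1 + metaLen - pos, r.2 + (PySem.List.slice inList (some r.1) (some (r.1 + metaLen))).sum)
        | none => none
    | _, _ => none

def nodeLen (inList : List Int) (pos : Int) : Int × Int :=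
  match nodeLenGo inList (inList.length + 1) pos with
  | some r => r
  | none => (0, 0)

-- ===== PORT B =====
-- B's while-loop: head of the list = top of Python's stack; each step either pushes the
-- next child's header frame or consumes the top node's metadata and pops. The (generous)
-- fuel only makes the loop total; it is proved never exhausted on inputs in Dom_ ∩ Pre_.
def runB (inList : List Int) : Nat → List (Int × Int) → Int → Int → Option (Int × Int)
  | _, [], cur, tot => some (cur, tot)
  | 0, _ :: _, _, _ => none
  | f + 1, (ch, me) :: rest, cur, tot =>
    if 0 < ch then
      match PySem.List.pyGet? inList cur, PySem.List.pyGet? inList (cur + 1) with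
      | some c1, some m1 => runB inList f ((c1, m1) :: (ch - 1, me) :: rest) (cur + 2) tot
      | _, _ => none
    else
      runB inList f rest (cur + me) (tot + (PySem.List.slice inList (some cur) (some (cur + me))).sum)

def nodeLen_alt (inList : List Int) (pos : Int) : Int × Int :=
  match PySem.List.pyGet? inList pos, PySem.List.pyGet? inList (pos + 1) with
  | some ch, some me =>
    match runB inList (2 ^ (32 * inList.length + 33)) [(ch, me)] (pos + 2) 0 with
    | some r => (r.1 - pos, r.2)
    | none => (0, 0)
  | _, _ => (0, 0)

-- ===== PRECONDITION & SPEC =====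
-- Whether A returns at all on (inList, pos) is itself a recursive property of this
-- length-prefixed encoding: chk accepts exactly the inputs on which A's recursion reaches
-- every header it needs (no IndexError) within the same recursion-depth fuel as the port;
-- it checks only the SHAPE (end positions), computing none of A's outputs (no sums).
def chkChildren (rec : Int → Option Int) : Nat → Int → Option Int
  | 0, c => some c
  | n + 1, c =>
    match rec c with
    | some e => chkChildren rec n e
    | none => none

def chk (inList : List Int) : Nat → Int → Option Int
  | 0, _ => none
  | f + 1, p =>
    match PySem.List.pyGet? inList p, PySem.List.pyGet? inList (p + 1) with
    | some ch, some me =>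
      if ch = 0 then some (p + 2 + me)
      else
        match chkChildren (fun c => chk inList f c) ch.toNat (p + 2) with
        | some c => some (c + me)
        | none => none
    | _, _ => none

-- Pre_ = A's recursion reads every header it needs and terminates (within the ports'
-- common recursion-depth fuel); it excludes exactly the inputs where the Python A raises
-- (IndexError on a malformed encoding, or unbounded recursion).
def Pre_nodeLen (inList : List Int) (pos : Int) : Prop :=
  (chk inList (inList.length + 1) pos).isSome = true
instance (inList : List Int) (pos : Int) : Decidable (Pre_nodeLen inList pos) := by
  unfold Pre_nodeLen; infer_instance

def pvWitness_nodeLen : List Int × Int := ([1, 1, 0, 1, 99, 2], 0)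

def Spec_nodeLen (inList : List Int) (pos : Int) (out : Int × Int) : Prop := out = nodeLen_alt inList pos
instance (inList : List Int) (pos : Int) (out : Int × Int) : Decidable (Spec_nodeLen inList pos out) := by unfold Spec_nodeLen; infer_instance

-- ===== CLAIM (what is proved, stated in full; the proofs are below) =====
def Claim_equal_nodeLen : Prop := ∀ (inList : List Int) (pos : Int), Dom_nodeLen inList pos → Pre_nodeLen inList pos → Spec_nodeLen inList pos (nodeLen inList pos)

-- ===== LEMMAS AND PROOFS =====

-- Soundness of the shape checker, tying A's recursion to B's stack machine: a checked node
-- spanning [p, e) yields (e - p, s) from nodeLenGo at the same fuel, and the machine crosses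
-- it in k steps (k + 1 ≤ (M+2)^f when every list value is ≤ M), consuming its frame.
theorem chk_sound (inList : List Int) (M : Nat) (hM : ∀ x ∈ inList, x.toNat ≤ M) :
    ∀ (f : Nat) (p e : Int), chk inList f p = some e →
    ∃ (ch me s : Int) (k : Nat),
      PySem.List.pyGet? inList p = some ch ∧
      PySem.List.pyGet? inList (p + 1) = some me ∧
      nodeLenGo inList f p = some (e - p, s) ∧
      k + 1 ≤ (M + 2) ^ f ∧
      ∀ (g : Nat) (st : List (Int × Int)) (tot : Int),
        runB inList (g + k) ((ch, me) :: st) (p + 2) tot = runB inList g st e (tot + s) := by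
  intro f
  induction f with
  | zero => intro p e h; simp [chk] at h
  | succ f IH =>
    have hP1 : 1 ≤ (M + 2) ^ f := Nat.one_le_pow _ _ (by omega)
    have hPow : (M + 2) ^ (f + 1) = (M + 2) ^ f * (M + 2) := pow_succ _ _
    have loopLem : ∀ (n : Nat) (c e : Int),
        chkChildren (fun q => chk inList f q) n c = some e →
        ∀ (acc : Int), ∃ (S : Int) (k : Nat),
          nodeLenChildren (fun q => nodeLenGo inList f q) n c acc = some (e, acc + S) ∧
          k ≤ n * (M + 2) ^ f ∧
          ∀ (g : Nat) (me : Int) (st : List (Int × Int)) (tot : Int),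
            runB inList (g + k) (((n : Int), me) :: st) c tot
              = runB inList g (((0 : Int), me) :: st) e (tot + S) := by
      intro n
      induction n with
      | zero =>
        intro c e h acc
        simp [chkChildren] at h
        subst h
        exact ⟨0, 0, by simp [nodeLenChildren], by omega, fun g me st tot => by simp⟩
      | succ n IHn =>
        intro c e h acc
        rw [chkChildren] at h
        cases hc : chk inList f c with
        | none => rw [hc] at h; simp at h
        | some e1 =>
          rw [hc] at h; simp only at h
          obtain ⟨ch1, me1, s1, k1, hg1, hg2, hgo1, hk1, hrun1⟩ := IH c e1 hc
          obtain ⟨S2, k2, hloop2, hk2, hrun2⟩ := IHn e1 e h (acc + s1)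
          refine ⟨s1 + S2, 1 + k1 + k2, ?_, by nlinarith, ?_⟩
          · rw [nodeLenChildren, hgo1]; simpa [add_assoc] using hloop2
          · intro g me st tot
            have hfuel : g + (1 + k1 + k2) = g + k2 + k1 + 1 := by omega
            have hcast : ((n + 1 : Nat) : Int) - 1 = (n : Int) := by push_cast; ring
            rw [hfuel, runB, if_pos (by exact_mod_cast Nat.succ_pos n), hg1, hg2]
            dsimp only
            rw [hcast, hrun1 (g + k2) (((n : Int), me) :: st) tot, hrun2 g me st (tot + s1), add_assoc]
    -- the node itself
    intro p e h
    rw [chk] at h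
    cases hch : PySem.List.pyGet? inList p with
    | none => rw [hch] at h; simp at h
    | some ch =>
    cases hme : PySem.List.pyGet? inList (p + 1) with
    | none => rw [hch, hme] at h; simp at h
    | some me =>
    rw [hch, hme] at h
    dsimp only at h
    split_ifs at h with hch0
    · -- leaf: zero children, metadata right after the header
      simp only [Option.some.injEq] at h
      refine ⟨ch, me, (PySem.List.slice inList (some (p + 2)) (some (p + 2 + me))).sum, 1,
        rfl, rfl, ?_, by nlinarith, ?_⟩
      · rw [nodeLenGo, hch, hme]
        dsimp only
        rw [if_pos hch0]
        have : e - p = 2 + me := by omega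
        rw [this]
      · intro g st tot
        rw [runB, if_neg (by omega)]
        have : p + 2 + me = e := by omega
        rw [this]
    · -- childNr ≠ 0: A's child loop (empty when childNr < 0)
      cases hcc : chkChildren (fun c => chk inList f c) ch.toNat (p + 2) with
      | none => rw [hcc] at h; simp at h
      | some c =>
        rw [hcc] at h
        simp only [Option.some.injEq] at h
        obtain ⟨S, kl, hloop, hkl, hreach⟩ := loopLem ch.toNat (p + 2) c hcc 0
        have hnle : ch.toNat ≤ M := hM ch (PySem.List.mem_of_pyGet?_eq_some _ hch)
        have hgo : nodeLenGo inList (f + 1) p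
            = some (e - p, (0 + S) + (PySem.List.slice inList (some c) (some (c + me))).sum) := by
          rw [nodeLenGo, hch, hme]
          dsimp only
          rw [if_neg hch0, hloop]
          dsimp only
          have : c + me - p = e - p := by omega
          rw [this]
        by_cases hpos : 0 < ch
        · -- positive child count: the machine counts the frame down
          have hchn : ((ch.toNat : Nat) : Int) = ch := Int.toNat_of_nonneg (by omega)
          refine ⟨ch, me, (0 + S) + (PySem.List.slice inList (some c) (some (c + me))).sum,
            kl + 1, rfl, rfl, hgo, by nlinarith, ?_⟩
          intro g st tot
          have hfuel : g + (kl + 1) = (g + 1) + kl := by omega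
          rw [hfuel, ← hchn, hreach (g + 1) me st tot, runB, if_neg (by omega)]
          have : c + me = e := by omega
          rw [this]
          ring_nf
        · -- negative child count: empty loop, same as a leaf for both programs
          have hn0 : ch.toNat = 0 := by omega
          have hc : c = p + 2 := by
            rw [hn0] at hcc; simp [chkChildren] at hcc; omega
          have hS : S = 0 := by
            rw [hn0] at hloop; simp [nodeLenChildren] at hloop; omega
          refine ⟨ch, me, (0 + S) + (PySem.List.slice inList (some c) (some (c + me))).sum,
            1, rfl, rfl, hgo, by nlinarith, ?_⟩
          intro g st tot
          rw [runB, if_neg (by omega)]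
          have : p + 2 + me = e := by omega
          rw [hc, this, hS]
          ring_nf

theorem pre_coverage (inList : List Int) (pos : Int)
    (hM : ∀ x ∈ inList, x.toNat ≤ 2147483648) (h : Pre_nodeLen inList pos) :
    nodeLen inList pos = nodeLen_alt inList pos := by
  obtain ⟨e, hchk⟩ := Option.isSome_iff_exists.mp h
  obtain ⟨ch, me, s, k, hg1, hg2, hgo, hk, hrun⟩ :=
    chk_sound inList 2147483648 hM (inList.length + 1) pos e hchk
  have hb : (2147483648 + 2 : Nat) ^ (inList.length + 1) ≤ 4294967296 ^ (inList.length + 1) :=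
    Nat.pow_le_pow_left (by norm_num) _
  have hc : (4294967296 : Nat) ^ (inList.length + 1) = 2 ^ (32 * (inList.length + 1)) := by
    rw [show (4294967296 : Nat) = 2 ^ 32 by norm_num, ← pow_mul]
  have hd : (2 : Nat) ^ (32 * (inList.length + 1)) ≤ 2 ^ (32 * inList.length + 33) :=
    Nat.pow_le_pow_right (by norm_num) (by omega)
  have hkle : k ≤ 2 ^ (32 * inList.length + 33) := by
    rw [hc] at hb; omega
  have hfuel : 2 ^ (32 * inList.length + 33)
      = (2 ^ (32 * inList.length + 33) - k) + k := (Nat.sub_add_cancel hkle).symm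
  rw [nodeLen, hgo, nodeLen_alt, hg1, hg2]
  dsimp only
  rw [hfuel, hrun (2 ^ (32 * inList.length + 33) - k) [] 0, runB]
  simp

-- ===== VERDICT (by name: the statement is the Claim_ definition above) =====
theorem nodeLen_spec : Claim_equal_nodeLen := by
  intro inList pos hdom hpre
  unfold Spec_nodeLen
  refine pre_coverage inList pos ?_ hpre
  intro x hx
  simp only [Dom_nodeLen, Bool.and_eq_true, List.all_eq_true] at hdom
  have := hdom.1 x hx
  simp only [pvDomInt, decide_eq_true_eq] at this
  omega
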